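-- pv_equiv track=rewrite | github.com/blazerzar/advent-of-code | 2020/day_17.py | simulate_cycles
-- ===== SOURCE A (Python) =====
-- from typing import Set, Tuple
--
-- def simulate_cycles(cycles: int, active_input: Set[Tuple[int, int, int]],
--                     d: int) -> int:
--     """Simulate <cycles> cycles and return number of cubes in active state"""
--     active = set(active_input)
--
--     for _ in range(cycles):
--         changed = set()
--
--         # Check which active cubes will become inactive
--         for ax, ay, az, aw in active:
--             if not (2 <= active_neighbours(active, ax, ay, az, aw, d) <= 3):
--                 changed.add((ax, ay, az, aw))
--             # Check which inactive cubes will become active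
--             for ix, iy, iz, iw in inactive_around_active(active, ax, ay,
--                                                          az, aw, d):
--                 if (ix, iy, iz, iw) not in changed and active_neighbours(
--                         active, ix, iy, iz, iw, d) == 3:
--                     changed.add((ix, iy, iz, iw))
--
--         # Update cubes
--         active = active.symmetric_difference(changed)
--     return len(active)
--
-- def active_neighbours(active: Set[Tuple[int, int, int]], x: int, y: int,
--                       z: int, w: int, d: int) -> int:
--     """Return number of active neighbours around the given cube"""
--     count = 0
--     for dx in range(-1, 2):
--         for dy in range(-1, 2):
--             for dz in range(-1, 2):
--                 for dw in ([0] if d == 3 else range(-1, 2)):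
--                     if dx != 0 or dy != 0 or dz != 0 or dw != 0:
--                         count += (x + dx, y + dy, z + dz, w + dw) in active
--     return count
--
-- def inactive_around_active(
--         active: Set[Tuple[int, int, int]], x: int, y: int,
--         z: int, w: int, d: int) -> Set[Tuple[int, int, int, int]]:
--     """Return set of inactive cubes around the given cube"""
--     inactive = set()
--     for dx in range(-1, 2):
--         for dy in range(-1, 2):
--             for dz in range(-1, 2):
--                 for dw in ([0] if d == 3 else range(-1, 2)):
--                     if ((dx != 0 or dy != 0 or dz != 0 or dw != 0) and
--                             (x + dx, y + dy, z + dz, w + dw) not in active):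
--                         inactive.add((x + dx, y + dy, z + dz, w + dw))
--     return inactive
-- ===== SOURCE B (Python) =====
-- def simulate_cycles(cycles, active_input, d):
--     """Simulate <cycles> cycles and return number of cubes in active state.
--
--     One pass per cycle: tally active neighbours of every cell in a dict,
--     then threshold the tallies to build the next active set directly."""
--     active = set(active_input)
--     offs = [(dx, dy, dz, dw)
--             for dx in (-1, 0, 1) for dy in (-1, 0, 1) for dz in (-1, 0, 1)
--             for dw in ((0,) if d == 3 else (-1, 0, 1))
--             if (dx, dy, dz, dw) != (0, 0, 0, 0)]
--     for _ in range(cycles):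
--         counts = {}
--         for x, y, z, w in active:
--             for dx, dy, dz, dw in offs:
--                 n = (x + dx, y + dy, z + dz, w + dw)
--                 counts[n] = counts.get(n, 0) + 1
--         active = {c for c, k in counts.items()
--                   if k == 3 or (k == 2 and c in active)}
--     return len(active)
-- ===== Notes on version B (the rewrite author's own statement) =====
-- stated objective: faster
-- what changed: Instead of calling a 26/80-offset neighbour scan for every active cube and again for every inactive cube around it and symmetric-differencing a 'changed' set, B makes one pass per cycle that tallies each active cube's neighbours into a dict and builds the next active set directly by thresholding the tallies.
import Mathlib
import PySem

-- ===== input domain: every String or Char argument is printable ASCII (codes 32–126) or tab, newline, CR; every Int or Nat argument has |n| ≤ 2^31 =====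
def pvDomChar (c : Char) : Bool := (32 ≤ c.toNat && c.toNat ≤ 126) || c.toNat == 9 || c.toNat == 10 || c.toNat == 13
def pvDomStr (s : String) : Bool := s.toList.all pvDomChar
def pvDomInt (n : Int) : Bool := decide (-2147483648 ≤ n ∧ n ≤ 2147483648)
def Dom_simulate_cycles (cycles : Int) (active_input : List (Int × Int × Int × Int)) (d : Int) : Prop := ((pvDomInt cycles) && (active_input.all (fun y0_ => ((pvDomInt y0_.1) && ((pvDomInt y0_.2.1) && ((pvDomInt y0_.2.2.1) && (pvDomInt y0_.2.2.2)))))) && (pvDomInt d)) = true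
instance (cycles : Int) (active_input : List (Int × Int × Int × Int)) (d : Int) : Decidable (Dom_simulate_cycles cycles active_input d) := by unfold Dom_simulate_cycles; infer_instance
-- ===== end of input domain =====

-- B replaces A's per-cell neighbour rescans by one tallying pass per cycle:
-- a dict counts every active cell's neighbours, then the tallies are
-- thresholded to build the next active set directly (no symmetric difference).


-- ===== PORT A =====
def active_neighbours (active : List (Int × Int × Int × Int)) (x y z w d : Int) : Int :=
  (PySem.List.pyRange (-1) 2 1).foldl (fun count dx =>
    (PySem.List.pyRange (-1) 2 1).foldl (fun count dy =>
      (PySem.List.pyRange (-1) 2 1).foldl (fun count dz =>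
        (if d == 3 then [(0 : Int)] else PySem.List.pyRange (-1) 2 1).foldl (fun count dw =>
          if dx ≠ 0 ∨ dy ≠ 0 ∨ dz ≠ 0 ∨ dw ≠ 0 then
            count + (if (x + dx, y + dy, z + dz, w + dw) ∈ active then 1 else 0)
          else count) count) count) count) 0

def inactive_around_active (active : List (Int × Int × Int × Int)) (x y z w d : Int) :
    PySem.Set (Int × Int × Int × Int) :=
  (PySem.List.pyRange (-1) 2 1).foldl (fun inactive dx =>
    (PySem.List.pyRange (-1) 2 1).foldl (fun inactive dy =>
      (PySem.List.pyRange (-1) 2 1).foldl (fun inactive dz =>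
        (if d == 3 then [(0 : Int)] else PySem.List.pyRange (-1) 2 1).foldl (fun inactive dw =>
          if (dx ≠ 0 ∨ dy ≠ 0 ∨ dz ≠ 0 ∨ dw ≠ 0) ∧
              (x + dx, y + dy, z + dz, w + dw) ∉ active then
            PySem.Set.add inactive (x + dx, y + dy, z + dz, w + dw)
          else inactive) inactive) inactive) inactive) PySem.Set.empty

def simulate_cycles (cycles : Int) (active_input : List (Int × Int × Int × Int)) (d : Int) : Int :=
  let active := PySem.Set.ofList active_input
  let active := (PySem.List.pyRange 0 cycles 1).foldl (fun active _ =>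
    let changed := active.foldl (fun changed a =>
      let n := active_neighbours active a.1 a.2.1 a.2.2.1 a.2.2.2 d
      let changed := if ¬(2 ≤ n ∧ n ≤ 3) then PySem.Set.add changed a else changed
      (inactive_around_active active a.1 a.2.1 a.2.2.1 a.2.2.2 d).foldl (fun changed i =>
        if i ∉ changed ∧ active_neighbours active i.1 i.2.1 i.2.2.1 i.2.2.2 d = 3 then
          PySem.Set.add changed i
        else changed) changed) PySem.Set.empty
    PySem.Set.symmDiff active changed) active
  PySem.Set.len active

-- ===== PORT B =====
def pvOffs (d : Int) : List (Int × Int × Int × Int) :=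
  [(-1 : Int), 0, 1].flatMap fun dx =>
    [(-1 : Int), 0, 1].flatMap fun dy =>
      [(-1 : Int), 0, 1].flatMap fun dz =>
        (if d == 3 then [(0 : Int)] else [(-1 : Int), 0, 1]).flatMap fun dw =>
          if (dx, dy, dz, dw) ≠ ((0 : Int), (0 : Int), (0 : Int), (0 : Int)) then
            [(dx, dy, dz, dw)] else []

def simulate_cycles_alt (cycles : Int) (active_input : List (Int × Int × Int × Int)) (d : Int) : Int :=
  let active := PySem.Set.ofList active_input
  let active := (PySem.List.pyRange 0 cycles 1).foldl (fun active _ =>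
    let counts := active.foldl (fun counts a =>
      (pvOffs d).foldl (fun counts o =>
        let n := (a.1 + o.1, a.2.1 + o.2.1, a.2.2.1 + o.2.2.1, a.2.2.2 + o.2.2.2)
        counts.insert n (counts.getD n 0 + 1)) counts)
      (PySem.Dict.empty : PySem.Dict (Int × Int × Int × Int) Int)
    PySem.Set.ofList ((counts.items.filter fun p =>
        p.2 == 3 || (p.2 == 2 && decide (p.1 ∈ active))).map fun p => p.1)) active
  PySem.Set.len active

-- ===== PRECONDITION & SPEC =====
def Spec_simulate_cycles (cycles : Int) (active_input : List (Int × Int × Int × Int)) (d : Int) (out : Int) : Prop := out = simulate_cycles_alt cycles active_input d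
instance (cycles : Int) (active_input : List (Int × Int × Int × Int)) (d : Int) (out : Int) : Decidable (Spec_simulate_cycles cycles active_input d out) := by unfold Spec_simulate_cycles; infer_instance

-- ===== CLAIM (what is proved, stated in full; the proofs are below) =====
def Claim_equal_simulate_cycles : Prop := ∀ (cycles : Int) (active_input : List (Int × Int × Int × Int)) (d : Int), Dom_simulate_cycles cycles active_input d → Spec_simulate_cycles cycles active_input d (simulate_cycles cycles active_input d)

-- ===== LEMMAS AND PROOFS =====

-- shift of a cell by an offset, and negation of an offset
def pvSh (a o : Int × Int × Int × Int) : Int × Int × Int × Int :=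
  (a.1 + o.1, a.2.1 + o.2.1, a.2.2.1 + o.2.2.1, a.2.2.2 + o.2.2.2)

def pvNeg (o : Int × Int × Int × Int) : Int × Int × Int × Int :=
  (-o.1, -o.2.1, -o.2.2.1, -o.2.2.2)

-- the number of active neighbours of c, as a pure specification
def pvN (d : Int) (s : List (Int × Int × Int × Int)) (c : Int × Int × Int × Int) : Nat :=
  (pvOffs d).countP (fun o => decide (pvSh c o ∈ s))

-- the multiset of neighbours generated by the active cells (B's tally stream)
def pvNbrs (d : Int) (s : List (Int × Int × Int × Int)) : List (Int × Int × Int × Int) :=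
  s.flatMap fun a => (pvOffs d).map (pvSh a)

-- one cycle of A, resp. of B (the loop bodies of the two ports)
def pvStepA (d : Int) (active : List (Int × Int × Int × Int)) : List (Int × Int × Int × Int) :=
  let changed := active.foldl (fun changed a =>
    let n := active_neighbours active a.1 a.2.1 a.2.2.1 a.2.2.2 d
    let changed := if ¬(2 ≤ n ∧ n ≤ 3) then PySem.Set.add changed a else changed
    (inactive_around_active active a.1 a.2.1 a.2.2.1 a.2.2.2 d).foldl (fun changed i =>
      if i ∉ changed ∧ active_neighbours active i.1 i.2.1 i.2.2.1 i.2.2.2 d = 3 then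
        PySem.Set.add changed i
      else changed) changed) PySem.Set.empty
  PySem.Set.symmDiff active changed

def pvStepB (d : Int) (active : List (Int × Int × Int × Int)) : List (Int × Int × Int × Int) :=
  let counts := active.foldl (fun counts a =>
    (pvOffs d).foldl (fun counts o =>
      let n := (a.1 + o.1, a.2.1 + o.2.1, a.2.2.1 + o.2.2.1, a.2.2.2 + o.2.2.2)
      counts.insert n (counts.getD n 0 + 1)) counts)
    (PySem.Dict.empty : PySem.Dict (Int × Int × Int × Int) Int)
  PySem.Set.ofList ((counts.items.filter fun p =>
      p.2 == 3 || (p.2 == 2 && decide (p.1 ∈ active))).map fun p => p.1)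

-- the two lists agree as sets
def pvRel (s t : List (Int × Int × Int × Int)) : Prop :=
  s.Nodup ∧ t.Nodup ∧ ∀ c, c ∈ s ↔ c ∈ t

theorem pv_simA (cycles : Int) (ai : List (Int × Int × Int × Int)) (d : Int) :
    simulate_cycles cycles ai d =
      PySem.Set.len ((PySem.List.pyRange 0 cycles 1).foldl (fun s _ => pvStepA d s)
        (PySem.Set.ofList ai)) := rfl

theorem pv_simB (cycles : Int) (ai : List (Int × Int × Int × Int)) (d : Int) :
    simulate_cycles_alt cycles ai d =
      PySem.Set.len ((PySem.List.pyRange 0 cycles 1).foldl (fun s _ => pvStepB d s)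
        (PySem.Set.ofList ai)) := rfl

-- generic fold lemmas
theorem pvMemFoldl {α β : Type} (y : α) (C : β → Prop) (g : List α → β → List α)
    (l : List β) (h : ∀ ch x, x ∈ l → (y ∈ g ch x ↔ y ∈ ch ∨ C x)) :
    ∀ ch, y ∈ l.foldl g ch ↔ y ∈ ch ∨ ∃ x ∈ l, C x := by
  induction l with
  | nil => simp
  | cons a t ih =>
    intro ch
    rw [List.foldl_cons, ih (fun ch x hx => h ch x (List.mem_cons_of_mem _ hx)),
      h ch a (List.mem_cons_self)]
    simp only [List.mem_cons]
    constructor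
    · rintro ((hy | hC) | ⟨x, hx, hCx⟩)
      · exact Or.inl hy
      · exact Or.inr ⟨a, Or.inl rfl, hC⟩
      · exact Or.inr ⟨x, Or.inr hx, hCx⟩
    · rintro (hy | ⟨x, (rfl | hx), hCx⟩)
      · exact Or.inl (Or.inl hy)
      · exact Or.inl (Or.inr hCx)
      · exact Or.inr ⟨x, hx, hCx⟩

theorem pvNodupFoldl {α β : Type} (g : List α → β → List α) (l : List β)
    (h : ∀ ch x, ch.Nodup → (g ch x).Nodup) :
    ∀ ch, ch.Nodup → (l.foldl g ch).Nodup := by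
  induction l with
  | nil => exact fun ch hch => hch
  | cons a t ih => exact fun ch hch => ih (g ch a) (h ch a hch)

theorem pvFoldlRel {α γ β : Type} (R : α → γ → Prop) (f : α → β → α) (g : γ → β → γ)
    (h : ∀ a c x, R a c → R (f a x) (g c x)) (l : List β) :
    ∀ a c, R a c → R (l.foldl f a) (l.foldl g c) := by
  induction l with
  | nil => exact fun a c hr => hr
  | cons b t ih => exact fun a c hr => ih _ _ (h a c b hr)

theorem pvSumCountP {β γ : Type} (l : List β) (m : List γ) (p : β → γ → Bool) :
    (l.map fun x => m.countP (p x)).sum = (m.map fun y => l.countP fun x => p x y).sum := by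
  induction l with
  | nil => simp
  | cons a t ih =>
    simp only [List.map_cons, List.sum_cons, ih, List.countP_cons]
    rw [show (fun y => t.countP (fun x => p x y) + if p a y = true then 1 else 0) =
        (fun y => t.countP (fun x => p x y) + (if p a y = true then 1 else 0)) from rfl]
    rw [List.sum_map_add]
    have : (m.map fun y => if p a y = true then 1 else 0).sum = m.countP (p a) := by
      rw [← PySem.List.sum_map_ite_one_zero_nat]
    omega

-- offset-list facts
theorem pvOffs_negrev (d : Int) : (pvOffs d).map pvNeg = (pvOffs d).reverse := by
  by_cases h : (d == 3) = true
  · simp only [pvOffs, h]; decide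
  · simp only [Bool.not_eq_true] at h; simp only [pvOffs, h]; decide

theorem pvNeg_mem {d : Int} {o : Int × Int × Int × Int} (h : o ∈ pvOffs d) :
    pvNeg o ∈ pvOffs d := by
  have h2 : pvNeg o ∈ (pvOffs d).map pvNeg := List.mem_map_of_mem h
  rw [pvOffs_negrev] at h2
  exact List.mem_reverse.mp h2

theorem pvSh_neg (a o : Int × Int × Int × Int) : pvSh (pvSh a o) (pvNeg o) = a := by
  simp [pvSh, pvNeg]

-- A's helpers, characterised
theorem pvAN_fold (s : List (Int × Int × Int × Int)) (x y z w d : Int) :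
    active_neighbours s x y z w d =
      (pvOffs d).foldl (fun c o => c + (if pvSh (x, y, z, w) o ∈ s then 1 else 0)) 0 := by
  by_cases h : (d == 3) = true
  · simp only [active_neighbours, pvOffs, pvSh, h,
      show PySem.List.pyRange (-1) 2 1 = [-1, 0, 1] from rfl]
    norm_num [List.foldl, List.flatMap]
  · simp only [Bool.not_eq_true] at h
    simp only [active_neighbours, pvOffs, pvSh, h,
      show PySem.List.pyRange (-1) 2 1 = [-1, 0, 1] from rfl]
    norm_num [List.foldl, List.flatMap]

theorem pvAN_eq (s : List (Int × Int × Int × Int)) (x y z w d : Int) :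
    active_neighbours s x y z w d = (pvN d s (x, y, z, w) : Int) := by
  rw [pvAN_fold, pvN]
  rw [PySem.List.foldl_congr_mem (pvOffs d) _
    (fun c o => if pvSh (x, y, z, w) o ∈ s then c + 1 else c) 0
    (fun acc o _ => by by_cases hP : pvSh (x, y, z, w) o ∈ s <;> simp [hP]),
    PySem.List.foldl_ite_add_one]
  simp

theorem pvMem_inactive (s : List (Int × Int × Int × Int)) (x y z w d : Int)
    (c : Int × Int × Int × Int) :
    c ∈ inactive_around_active s x y z w d ↔
      (∃ o ∈ pvOffs d, c = pvSh (x, y, z, w) o) ∧ c ∉ s := by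
  have R3 : PySem.List.pyRange (-1) 2 1 = [-1, 0, 1] := rfl
  set DW : List Int := if d == 3 then [(0 : Int)] else [(-1 : Int), 0, 1] with hDW
  have hdw : ∀ dx dy dz : Int, ∀ ch,
      c ∈ DW.foldl (fun inactive dw =>
        if (dx ≠ 0 ∨ dy ≠ 0 ∨ dz ≠ 0 ∨ dw ≠ 0) ∧ (x + dx, y + dy, z + dz, w + dw) ∉ s then
          PySem.Set.add inactive (x + dx, y + dy, z + dz, w + dw)
        else inactive) ch ↔
      c ∈ ch ∨ ∃ dw ∈ DW, ((dx ≠ 0 ∨ dy ≠ 0 ∨ dz ≠ 0 ∨ dw ≠ 0) ∧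
        (x + dx, y + dy, z + dz, w + dw) ∉ s) ∧ c = (x + dx, y + dy, z + dz, w + dw) := by
    intro dx dy dz
    refine pvMemFoldl c _ _ DW ?_
    intro ch dw _
    split_ifs with hP
    · rw [PySem.Set.mem_add]; tauto
    · tauto
  have hz : ∀ dx dy : Int, ∀ ch,
      c ∈ (PySem.List.pyRange (-1) 2 1).foldl (fun inactive dz =>
        DW.foldl (fun inactive dw =>
          if (dx ≠ 0 ∨ dy ≠ 0 ∨ dz ≠ 0 ∨ dw ≠ 0) ∧ (x + dx, y + dy, z + dz, w + dw) ∉ s then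
            PySem.Set.add inactive (x + dx, y + dy, z + dz, w + dw)
          else inactive) inactive) ch ↔
      c ∈ ch ∨ ∃ dz ∈ PySem.List.pyRange (-1) 2 1, ∃ dw ∈ DW,
        ((dx ≠ 0 ∨ dy ≠ 0 ∨ dz ≠ 0 ∨ dw ≠ 0) ∧
          (x + dx, y + dy, z + dz, w + dw) ∉ s) ∧ c = (x + dx, y + dy, z + dz, w + dw) := by
    intro dx dy
    exact pvMemFoldl c _ _ _ (fun ch dz _ => hdw dx dy dz ch)
  have hy : ∀ dx : Int, ∀ ch,
      c ∈ (PySem.List.pyRange (-1) 2 1).foldl (fun inactive dy =>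
        (PySem.List.pyRange (-1) 2 1).foldl (fun inactive dz =>
          DW.foldl (fun inactive dw =>
            if (dx ≠ 0 ∨ dy ≠ 0 ∨ dz ≠ 0 ∨ dw ≠ 0) ∧ (x + dx, y + dy, z + dz, w + dw) ∉ s then
              PySem.Set.add inactive (x + dx, y + dy, z + dz, w + dw)
            else inactive) inactive) inactive) ch ↔
      c ∈ ch ∨ ∃ dy ∈ PySem.List.pyRange (-1) 2 1, ∃ dz ∈ PySem.List.pyRange (-1) 2 1,
        ∃ dw ∈ DW, ((dx ≠ 0 ∨ dy ≠ 0 ∨ dz ≠ 0 ∨ dw ≠ 0) ∧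
          (x + dx, y + dy, z + dz, w + dw) ∉ s) ∧ c = (x + dx, y + dy, z + dz, w + dw) := by
    intro dx
    exact pvMemFoldl c _ _ _ (fun ch dy _ => hz dx dy ch)
  have hx :
      c ∈ inactive_around_active s x y z w d ↔
      c ∈ (PySem.Set.empty : PySem.Set (Int × Int × Int × Int)) ∨
        ∃ dx ∈ PySem.List.pyRange (-1) 2 1, ∃ dy ∈ PySem.List.pyRange (-1) 2 1,
          ∃ dz ∈ PySem.List.pyRange (-1) 2 1, ∃ dw ∈ DW,
            ((dx ≠ 0 ∨ dy ≠ 0 ∨ dz ≠ 0 ∨ dw ≠ 0) ∧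
              (x + dx, y + dy, z + dz, w + dw) ∉ s) ∧ c = (x + dx, y + dy, z + dz, w + dw) := by
    rw [inactive_around_active]
    exact pvMemFoldl c _ _ _ (fun ch dx _ => hy dx ch) PySem.Set.empty
  rw [hx]
  simp only [PySem.Set.empty, List.not_mem_nil, false_or, R3]
  constructor
  · rintro ⟨dx, hdx, dy, hdy, dz, hdz, dw, hdwm, ⟨⟨hne, hnotin⟩, rfl⟩⟩
    refine ⟨⟨(dx, dy, dz, dw), ?_, rfl⟩, hnotin⟩
    have hne2 : ((dx, dy, dz, dw) : Int × Int × Int × Int) ≠ (0, 0, 0, 0) := by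
      simp only [ne_eq, Prod.mk.injEq, not_and]
      intro h1 h2 h3; subst h1; subst h2; subst h3
      rcases hne with h | h | h | h <;> simp_all
    simp only [pvOffs, List.mem_flatMap]
    exact ⟨dx, hdx, dy, hdy, dz, hdz, dw, hdwm, by simp [hne2]⟩
  · rintro ⟨⟨o, ho, rfl⟩, hnotin⟩
    simp only [pvOffs, List.mem_flatMap] at ho
    obtain ⟨dx, hdx, dy, hdy, dz, hdz, dw, hdwm, hcond⟩ := ho
    split_ifs at hcond with hne
    · simp only [List.mem_singleton] at hcond
      subst hcond
      refine ⟨dx, hdx, dy, hdy, dz, hdz, dw, hdwm, ⟨⟨?_, hnotin⟩, rfl⟩⟩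
      simp only [ne_eq, Prod.mk.injEq] at hne
      tauto
    · simp at hcond

theorem pvN_pos (d : Int) (s : List (Int × Int × Int × Int)) (c : Int × Int × Int × Int)
    (h : 0 < pvN d s c) : ∃ a ∈ s, ∃ o ∈ pvOffs d, c = pvSh a o := by
  obtain ⟨o, ho, hm⟩ := List.countP_pos_iff.mp h
  simp only [decide_eq_true_eq] at hm
  exact ⟨pvSh c o, hm, pvNeg o, pvNeg_mem ho, (pvSh_neg c o).symm⟩

-- membership in one A-cycle
theorem pvMem_stepA (d : Int) (s : List (Int × Int × Int × Int))
    (c : Int × Int × Int × Int) :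
    c ∈ pvStepA d s ↔
      ((c ∈ s ∧ 2 ≤ pvN d s c ∧ pvN d s c ≤ 3) ∨
       (c ∉ s ∧ pvN d s c = 3)) := by
  have hinner : ∀ y a : Int × Int × Int × Int, ∀ ch,
      y ∈ (inactive_around_active s a.1 a.2.1 a.2.2.1 a.2.2.2 d).foldl (fun changed i =>
        if i ∉ changed ∧ active_neighbours s i.1 i.2.1 i.2.2.1 i.2.2.2 d = 3 then
          PySem.Set.add changed i
        else changed) ch ↔
      y ∈ ch ∨ ∃ i ∈ inactive_around_active s a.1 a.2.1 a.2.2.1 a.2.2.2 d,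
        y = i ∧ active_neighbours s i.1 i.2.1 i.2.2.1 i.2.2.2 d = 3 := by
    intro y a
    refine pvMemFoldl y _ _ _ ?_
    intro ch i _
    split_ifs with hg
    · rw [PySem.Set.mem_add]
      constructor
      · rintro (h | rfl)
        · exact Or.inl h
        · exact Or.inr ⟨rfl, hg.2⟩
      · rintro (h | ⟨rfl, _⟩)
        · exact Or.inl h
        · exact Or.inr rfl
    · constructor
      · exact Or.inl
      · rintro (h | ⟨rfl, h3⟩)
        · exact h
        · rcases not_and_or.mp hg with h | h
          · exact not_not.mp h
          · exact absurd h3 h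
  have hchg : ∀ y : Int × Int × Int × Int,
      y ∈ s.foldl (fun changed a =>
        let n := active_neighbours s a.1 a.2.1 a.2.2.1 a.2.2.2 d
        let changed := if ¬(2 ≤ n ∧ n ≤ 3) then PySem.Set.add changed a else changed
        (inactive_around_active s a.1 a.2.1 a.2.2.1 a.2.2.2 d).foldl (fun changed i =>
          if i ∉ changed ∧ active_neighbours s i.1 i.2.1 i.2.2.1 i.2.2.2 d = 3 then
            PySem.Set.add changed i
          else changed) changed) PySem.Set.empty ↔
      ∃ a ∈ s,
        ((¬(2 ≤ active_neighbours s a.1 a.2.1 a.2.2.1 a.2.2.2 d ∧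
            active_neighbours s a.1 a.2.1 a.2.2.1 a.2.2.2 d ≤ 3)) ∧ y = a) ∨
        (y ∈ inactive_around_active s a.1 a.2.1 a.2.2.1 a.2.2.2 d ∧
          active_neighbours s y.1 y.2.1 y.2.2.1 y.2.2.2 d = 3) := by
    intro y
    refine (pvMemFoldl y (fun a =>
        ((¬(2 ≤ active_neighbours s a.1 a.2.1 a.2.2.1 a.2.2.2 d ∧
            active_neighbours s a.1 a.2.1 a.2.2.1 a.2.2.2 d ≤ 3)) ∧ y = a) ∨
        (y ∈ inactive_around_active s a.1 a.2.1 a.2.2.1 a.2.2.2 d ∧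
          active_neighbours s y.1 y.2.1 y.2.2.1 y.2.2.2 d = 3)) _ s ?_
        PySem.Set.empty).trans (by simp [PySem.Set.empty])
    intro ch a _
    show y ∈ (inactive_around_active s a.1 a.2.1 a.2.2.1 a.2.2.2 d).foldl _
      (if ¬(2 ≤ active_neighbours s a.1 a.2.1 a.2.2.1 a.2.2.2 d ∧
          active_neighbours s a.1 a.2.1 a.2.2.1 a.2.2.2 d ≤ 3) then
        PySem.Set.add ch a else ch) ↔ _
    rw [hinner y a]
    have hch : y ∈ (if ¬(2 ≤ active_neighbours s a.1 a.2.1 a.2.2.1 a.2.2.2 d ∧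
          active_neighbours s a.1 a.2.1 a.2.2.1 a.2.2.2 d ≤ 3) then
        PySem.Set.add ch a else ch) ↔
        y ∈ ch ∨ ((¬(2 ≤ active_neighbours s a.1 a.2.1 a.2.2.1 a.2.2.2 d ∧
          active_neighbours s a.1 a.2.1 a.2.2.1 a.2.2.2 d ≤ 3)) ∧ y = a) := by
      split_ifs with hg
      · tauto
      · rw [PySem.Set.mem_add]; tauto
    rw [hch]
    constructor
    · rintro ((h | h) | ⟨i, hi, rfl, h3⟩)
      · exact Or.inl h
      · exact Or.inr (Or.inl h)
      · exact Or.inr (Or.inr ⟨hi, h3⟩)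
    · rintro (h | (h | ⟨hi, h3⟩))
      · exact Or.inl (Or.inl h)
      · exact Or.inl (Or.inr h)
      · exact Or.inr ⟨y, hi, rfl, h3⟩
  show c ∈ PySem.Set.symmDiff s _ ↔ _
  rw [PySem.Set.mem_symmDiff]
  rw [hchg c]
  have hAN : ∀ v : Int × Int × Int × Int,
      active_neighbours s v.1 v.2.1 v.2.2.1 v.2.2.2 d = (pvN d s v : Int) := by
    intro v; rw [pvAN_eq]
  by_cases hc : c ∈ s
  · have hnot : ¬(∃ a ∈ s,
        ((¬(2 ≤ active_neighbours s a.1 a.2.1 a.2.2.1 a.2.2.2 d ∧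
            active_neighbours s a.1 a.2.1 a.2.2.1 a.2.2.2 d ≤ 3)) ∧ c = a) ∨
        (c ∈ inactive_around_active s a.1 a.2.1 a.2.2.1 a.2.2.2 d ∧
          active_neighbours s c.1 c.2.1 c.2.2.1 c.2.2.2 d = 3)) ↔
        (2 ≤ pvN d s c ∧ pvN d s c ≤ 3) := by
      constructor
      · intro hno
        by_contra hbad
        refine hno ⟨c, hc, Or.inl ⟨?_, rfl⟩⟩
        rw [hAN c]
        intro ⟨h1, h2⟩
        exact hbad ⟨by exact_mod_cast h1, by exact_mod_cast h2⟩
      · rintro ⟨h2, h3⟩ ⟨a, _, (⟨hcond, rfl⟩ | ⟨hmem, _⟩)⟩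
        · refine hcond ?_
          rw [hAN c]
          constructor <;> [exact_mod_cast h2; exact_mod_cast h3]
        · exact ((pvMem_inactive s a.1 a.2.1 a.2.2.1 a.2.2.2 d c).mp hmem).2 hc
    constructor
    · rintro (⟨_, hnc⟩ | ⟨hcg, hns⟩)
      · exact Or.inl ⟨hc, hnot.mp hnc⟩
      · exact absurd hc hns
    · rintro (⟨_, hb⟩ | ⟨hns, _⟩)
      · exact Or.inl ⟨hc, hnot.mpr hb⟩
      · exact absurd hc hns
  · have hiff : (∃ a ∈ s,
        ((¬(2 ≤ active_neighbours s a.1 a.2.1 a.2.2.1 a.2.2.2 d ∧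
            active_neighbours s a.1 a.2.1 a.2.2.1 a.2.2.2 d ≤ 3)) ∧ c = a) ∨
        (c ∈ inactive_around_active s a.1 a.2.1 a.2.2.1 a.2.2.2 d ∧
          active_neighbours s c.1 c.2.1 c.2.2.1 c.2.2.2 d = 3)) ↔
        pvN d s c = 3 := by
      constructor
      · rintro ⟨a, ha, (⟨_, rfl⟩ | ⟨_, h3⟩)⟩
        · exact absurd ha hc
        · rw [hAN c] at h3; exact_mod_cast h3
      · intro h3
        obtain ⟨a, ha, o, ho, hco⟩ := pvN_pos d s c (by omega)
        refine ⟨a, ha, Or.inr ⟨?_, by rw [hAN c]; exact_mod_cast h3⟩⟩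
        rw [pvMem_inactive]
        exact ⟨⟨o, ho, by simpa [Prod.ext_iff] using hco⟩, hc⟩
    constructor
    · rintro (⟨hcs, _⟩ | ⟨hcg, _⟩)
      · exact absurd hcs hc
      · exact Or.inr ⟨hc, hiff.mp hcg⟩
    · rintro (⟨hcs, _⟩ | ⟨_, h3⟩)
      · exact absurd hcs hc
      · exact Or.inr ⟨hiff.mpr h3, hc⟩

theorem pvNodup_stepA (d : Int) (s : List (Int × Int × Int × Int)) (hs : s.Nodup) :
    (pvStepA d s).Nodup := by
  refine PySem.Set.nodup_symmDiff _ _ hs ?_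
  refine pvNodupFoldl _ _ ?_ _ List.nodup_nil
  intro ch a hch
  refine pvNodupFoldl _ _ ?_ _ ?_
  · intro ch2 i hch2
    split_ifs with h <;> first | exact hch2 | exact PySem.Set.nodup_add _ _ hch2
  · split_ifs with h <;> first | exact hch | exact PySem.Set.nodup_add _ _ hch

-- B's tally dict is the counter of the neighbour stream
theorem pvCount_nbrs (d : Int) (s : List (Int × Int × Int × Int)) (hs : s.Nodup)
    (c : Int × Int × Int × Int) : (pvNbrs d s).count c = pvN d s c := by
  rw [pvNbrs, List.count_flatMap]
  have h1 : (s.map (List.count c ∘ fun a => (pvOffs d).map (pvSh a))) =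
      (s.map fun a => (pvOffs d).countP fun o => pvSh a o == c) := by
    refine List.map_congr_left ?_
    intro a _
    simp only [Function.comp_apply, List.count_eq_countP, List.countP_map]
    rfl
  rw [h1, pvSumCountP]
  have h2 : ((pvOffs d).map fun o => s.countP fun a => pvSh a o == c) =
      ((pvOffs d).map fun o => if decide (pvSh c (pvNeg o) ∈ s) = true then 1 else 0) := by
    refine List.map_congr_left ?_
    intro o _
    have hpred : ∀ a : Int × Int × Int × Int, (pvSh a o == c) = (a == pvSh c (pvNeg o)) := by
      intro a
      have hiff : (pvSh a o = c) ↔ (a = pvSh c (pvNeg o)) := by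
        simp only [pvSh, pvNeg, Prod.ext_iff]
        constructor <;> intro hh <;>
          exact ⟨by omega, by omega, by omega, by omega⟩
      rw [Bool.eq_iff_iff]
      simpa [beq_iff_eq] using hiff
    rw [List.countP_congr fun a _ => by rw [hpred a]]
    rw [show (fun a => a == pvSh c (pvNeg o)) = (· == pvSh c (pvNeg o)) from rfl,
      ← List.count_eq_countP]
    by_cases hm : pvSh c (pvNeg o) ∈ s
    · simp only [hm, decide_true, if_true]
      exact List.count_eq_one_of_mem hs hm
    · simp only [hm, decide_false, Bool.false_eq_true, if_false]
      exact List.count_eq_zero.mpr hm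
  rw [h2, PySem.List.sum_map_ite_one_zero_nat]
  have h3 : (pvOffs d).countP (fun o => decide (pvSh c (pvNeg o) ∈ s)) =
      (pvOffs d).countP fun o => decide (pvSh c o ∈ s) := by
    have hm := List.countP_map (p := fun o => decide (pvSh c o ∈ s)) (f := pvNeg)
      (l := pvOffs d)
    rw [pvOffs_negrev, List.countP_reverse] at hm
    exact hm.symm
  rw [h3]
  rfl

theorem pvStepB_eq (d : Int) (s : List (Int × Int × Int × Int)) :
    pvStepB d s = (PySem.Set.ofList (pvNbrs d s)).filter fun k =>
      ((((pvNbrs d s).count k : Int) == 3) ||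
       ((((pvNbrs d s).count k : Int) == 2) && decide (k ∈ s))) := by
  have hc : (s.foldl (fun counts a =>
      (pvOffs d).foldl (fun counts o =>
        counts.insert (a.1 + o.1, a.2.1 + o.2.1, a.2.2.1 + o.2.2.1, a.2.2.2 + o.2.2.2)
          (counts.getD (a.1 + o.1, a.2.1 + o.2.1, a.2.2.1 + o.2.2.1, a.2.2.2 + o.2.2.2) 0 + 1))
        counts)
      (PySem.Dict.empty : PySem.Dict (Int × Int × Int × Int) Int))
      = PySem.Dict.counter (pvNbrs d s) := by
    rw [← PySem.Dict.foldl_insert_getD_add_one_eq_counter, pvNbrs, List.foldl_flatMap]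
    refine PySem.List.foldl_congr_mem _ _ _ _ ?_
    intro acc a _
    rw [List.foldl_map]
    rfl
  simp only [pvStepB]
  rw [hc, PySem.Dict.items_counter, List.filter_map, List.map_map]
  have hmapid : ((fun p => p.1) ∘ fun k : Int × Int × Int × Int =>
      (k, (((pvNbrs d s).count k : Nat) : Int))) = id := rfl
  rw [hmapid, List.map_id]
  exact PySem.Set.ofList_eq_self_of_nodup _
    ((PySem.Set.nodup_ofList (pvNbrs d s)).filter _)


theorem pvMem_stepB (d : Int) (s : List (Int × Int × Int × Int)) (hs : s.Nodup)
    (c : Int × Int × Int × Int) :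
    c ∈ pvStepB d s ↔
      ((∃ a ∈ s, ∃ o ∈ pvOffs d, c = pvSh a o) ∧
       (pvN d s c = 3 ∨ (pvN d s c = 2 ∧ c ∈ s))) := by
  rw [pvStepB_eq]
  simp only [List.mem_filter, PySem.Set.mem_ofList]
  rw [pvCount_nbrs d s hs c]
  simp only [pvNbrs, List.mem_flatMap, List.mem_map, Bool.or_eq_true, Bool.and_eq_true,
    beq_iff_eq, decide_eq_true_eq]
  constructor
  · rintro ⟨⟨a, ha, o, ho, heq⟩, hcond⟩
    refine ⟨⟨a, ha, o, ho, heq.symm⟩, ?_⟩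
    rcases hcond with h3 | ⟨h2, hmem⟩
    · exact Or.inl (by exact_mod_cast h3)
    · exact Or.inr ⟨by exact_mod_cast h2, hmem⟩
  · rintro ⟨⟨a, ha, o, ho, heq⟩, hcond⟩
    refine ⟨⟨a, ha, o, ho, heq.symm⟩, ?_⟩
    rcases hcond with h3 | ⟨h2, hmem⟩
    · exact Or.inl (by exact_mod_cast h3)
    · exact Or.inr ⟨by exact_mod_cast h2, hmem⟩

theorem pvNodup_stepB (d : Int) (s : List (Int × Int × Int × Int)) :
    (pvStepB d s).Nodup := by
  simp only [pvStepB]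
  exact PySem.Set.nodup_ofList _

-- the two cycle functions preserve set-agreement
theorem pvStep_rel (d : Int) (s t : List (Int × Int × Int × Int)) (h : pvRel s t) :
    pvRel (pvStepA d s) (pvStepB d t) := by
  obtain ⟨hsN, htN, hmem⟩ := h
  have hN : ∀ v, pvN d s v = pvN d t v := fun v =>
    List.countP_congr fun o _ => by
      simp only [decide_eq_true_eq]
      exact hmem (pvSh v o)
  refine ⟨pvNodup_stepA d s hsN, pvNodup_stepB d t, ?_⟩
  intro c
  rw [pvMem_stepA, pvMem_stepB d t htN c]
  constructor
  · rintro (⟨hcs, h2, h3⟩ | ⟨hns, h3⟩)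
    · have hct : c ∈ t := (hmem c).mp hcs
      have hpos : 0 < pvN d t c := by rw [← hN]; omega
      obtain ⟨a, ha, o, ho, hco⟩ := pvN_pos d t c hpos
      refine ⟨⟨a, ha, o, ho, hco⟩, ?_⟩
      rw [← hN]
      rcases (by omega : pvN d s c = 2 ∨ pvN d s c = 3) with h | h
      · exact Or.inr ⟨h, hct⟩
      · exact Or.inl h
    · have hpos : 0 < pvN d t c := by rw [← hN]; omega
      obtain ⟨a, ha, o, ho, hco⟩ := pvN_pos d t c hpos
      exact ⟨⟨a, ha, o, ho, hco⟩, Or.inl (by rw [← hN]; exact h3)⟩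
  · rintro ⟨_, (h3 | ⟨h2, hct⟩)⟩
    · rw [← hN] at h3
      by_cases hcs : c ∈ s
      · exact Or.inl ⟨hcs, by omega, by omega⟩
      · exact Or.inr ⟨hcs, h3⟩
    · have hcs : c ∈ s := (hmem c).mpr hct
      rw [← hN] at h2
      exact Or.inl ⟨hcs, by omega, by omega⟩

-- ===== VERDICT (by name: the statement is the Claim_ definition above) =====
theorem simulate_cycles_spec : Claim_equal_simulate_cycles := by
  intro cycles ai d _
  unfold Spec_simulate_cycles
  rw [pv_simA, pv_simB]
  have h := pvFoldlRel pvRel (fun s _ => pvStepA d s) (fun t _ => pvStepB d t)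
    (fun a c x hr => pvStep_rel d a c hr) (PySem.List.pyRange 0 cycles 1)
    (PySem.Set.ofList ai) (PySem.Set.ofList ai)
    ⟨PySem.Set.nodup_ofList ai, PySem.Set.nodup_ofList ai, fun _ => Iff.rfl⟩
  obtain ⟨h1, h2, h3⟩ := h
  have : ((PySem.List.pyRange 0 cycles 1).foldl (fun s _ => pvStepA d s)
      (PySem.Set.ofList ai)).Perm ((PySem.List.pyRange 0 cycles 1).foldl
      (fun t _ => pvStepB d t) (PySem.Set.ofList ai)) :=
    (List.perm_ext_iff_of_nodup h1 h2).mpr h3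
  simp [PySem.Set.len, this.length_eq]
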